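-- pv_equiv track=rewrite | github.com/raabhya-aggarwal/OperationsResearch | northwest_app.py | north_west_corner_method
-- ===== SOURCE A (Python) =====
-- def north_west_corner_method(supply, demand, costs):
--     m = len(supply)
--     n = len(demand)
--     allocation = [[0 for _ in range(n)] for _ in range(m)]
--     i = 0
--     j = 0
--     while i < m and j < n:
--         alloc = min(supply[i], demand[j])
--         allocation[i][j] = alloc
--         supply[i] -= alloc
--         demand[j] -= alloc
--         if supply[i] == 0:
--             i += 1
--         else:
--             j += 1
--     total_cost = 0
--     for x in range(m):
--         for y in range(n):
--             total_cost += allocation[x][y] * costs[x][y]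
--     return allocation, total_cost
-- ===== SOURCE B (Python) =====
-- def north_west_corner_method(supply, demand, costs):
--     # Row-major construction: drain demands into each supply row, emitting the
--     # row as zero-padding ++ allocated segment, with the cost fused in.
--     n = len(demand)
--     allocation = []
--     total_cost = 0
--     j = 0
--     for i in range(len(supply)):
--         if j >= n:
--             allocation.append([0] * n)
--             continue
--         s = supply[i]
--         start = j
--         segs = []
--         while j < n and demand[j] < s:
--             d = demand[j]
--             segs.append(d)
--             total_cost += d * costs[i][j]
--             demand[j] = 0
--             s -= d
--             j += 1
--         if j < n:
--             segs.append(s)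
--             total_cost += s * costs[i][j]
--             demand[j] -= s
--             supply[i] = 0
--         else:
--             supply[i] = s
--         allocation.append([0] * start + segs + [0] * (n - start - len(segs)))
--     return allocation, total_cost
-- ===== Notes on version B (the rewrite author's own statement) =====
-- stated objective: alternative
-- what changed: B builds the allocation row by row: an outer loop over supplies with an inner drain loop over demands driven by the comparison demand[j] < s (no min, no ==0 test), emitting each row as zero-padding ++ allocated segment by list concatenation and fusing the cost into the drain, instead of A's flat cell-stepping while-loop that mutates a pre-built zero matrix and then re-scans all m*n cells in a separate nested cost pass.
import Mathlib
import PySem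

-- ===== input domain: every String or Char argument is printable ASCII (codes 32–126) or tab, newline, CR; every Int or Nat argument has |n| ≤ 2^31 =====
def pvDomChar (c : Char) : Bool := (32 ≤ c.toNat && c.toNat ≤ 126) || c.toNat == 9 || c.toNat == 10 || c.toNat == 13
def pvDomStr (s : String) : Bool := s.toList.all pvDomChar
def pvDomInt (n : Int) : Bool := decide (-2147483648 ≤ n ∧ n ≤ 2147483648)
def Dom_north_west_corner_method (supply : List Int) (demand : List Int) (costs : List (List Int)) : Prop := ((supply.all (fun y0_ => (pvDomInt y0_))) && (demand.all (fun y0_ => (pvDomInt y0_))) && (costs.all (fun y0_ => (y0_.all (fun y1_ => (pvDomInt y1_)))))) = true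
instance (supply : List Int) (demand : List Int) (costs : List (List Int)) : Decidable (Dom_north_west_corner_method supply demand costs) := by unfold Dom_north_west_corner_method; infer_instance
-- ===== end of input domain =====

-- B builds the allocation row by row (outer loop over supplies, inner drain loop over demands
-- driven by the comparison demand[j] < s, rows emitted as zero-padding ++ segment, cost fused in),
-- instead of A's flat cell-stepping while-loop over a mutated zero matrix plus a separate cost pass.
-- Both Pythons mutate supply/demand in place with the same net effect; the theorems are about the
-- return value.

-- ===== PORT A =====
-- the staircase while-loop of A; the in-place mutation of supply/demand is carried as fresh lists
-- (List.set). supply[i]/demand[j] reads are at indices 0 <= i < len, where List.getD is exactly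
-- Python indexing.
def nwAllocA (M : List (List Int)) (sup dem : List Int) (i j : Nat) : List (List Int) :=
  if h : i < sup.length ∧ j < dem.length then
    let alloc := min (sup.getD i 0) (dem.getD j 0)
    let M' := M.set i ((M.getD i []).set j alloc)
    let sup' := sup.set i (sup.getD i 0 - alloc)
    let dem' := dem.set j (dem.getD j 0 - alloc)
    if sup'.getD i 0 = 0 then nwAllocA M' sup' dem' (i+1) j
    else nwAllocA M' sup' dem' i (j+1)
  else M
termination_by (sup.length - i) + (dem.length - j)
decreasing_by all_goals (simp only [List.length_set]; omega)

-- costs[x][y] is read with getD; under Pre_ every read is in range, where getD is exactly Python indexing.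
def north_west_corner_method (supply : List Int) (demand : List Int) (costs : List (List Int)) : List (List Int) × Int :=
  let m := supply.length
  let n := demand.length
  let allocation := (List.range m).map (fun _ => (List.range n).map (fun _ => (0 : Int)))
  let M := nwAllocA allocation supply demand 0 0
  let total := (List.range m).foldl
    (fun acc x => (List.range n).foldl
      (fun acc y => acc + ((M.getD x []).getD y 0) * ((costs.getD x []).getD y 0)) acc) 0
  (M, total)

-- ===== PORT B =====
-- the inner drain while-loop of B: consumes demand entries strictly smaller than the remaining
-- supply s, collecting the allocated segment and the fused cost.
def bDrain (dem ci : List Int) (j : Nat) (s : Int) (segs : List Int) (total : Int) :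
    List Int × Nat × Int × List Int × Int :=
  if h : j < dem.length ∧ dem.getD j 0 < s then
    bDrain (dem.set j 0) ci (j+1) (s - dem.getD j 0) (segs ++ [dem.getD j 0])
      (total + dem.getD j 0 * ci.getD j 0)
  else (dem, j, s, segs, total)
termination_by dem.length - j
decreasing_by simp only [List.length_set]; omega

-- one iteration of B's outer for-loop (state: supply, demand, current column j, rows, total)
def bStep (costs : List (List Int)) (n : Nat)
    (st : List Int × List Int × Nat × List (List Int) × Int) (i : Nat) :
    List Int × List Int × Nat × List (List Int) × Int :=
  match st with
  | (sup, dem, j, rows, total) =>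
    if n ≤ j then (sup, dem, j, rows ++ [List.replicate n 0], total)
    else
      match bDrain dem (costs.getD i []) j (sup.getD i 0) [] total with
      | (dem', j', s', segs, total') =>
        if j' < n then
          (sup.set i 0, dem'.set j' (dem'.getD j' 0 - s'), j',
           rows ++ [List.replicate j 0 ++ (segs ++ [s']) ++
                     List.replicate (n - j - (segs ++ [s']).length) 0],
           total' + s' * (costs.getD i []).getD j' 0)
        else
          (sup.set i s', dem', j',
           rows ++ [List.replicate j 0 ++ segs ++ List.replicate (n - j - segs.length) 0],
           total')

def north_west_corner_method_alt (supply : List Int) (demand : List Int) (costs : List (List Int)) : List (List Int) × Int :=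
  let n := demand.length
  let st := (List.range supply.length).foldl (bStep costs n) (supply, demand, 0, [], 0)
  (st.2.2.2.1, st.2.2.2.2)

-- ===== PRECONDITION & SPEC =====
-- Pre_ excludes exactly the inputs on which A raises IndexError: when both supply and demand are
-- nonempty, the final cost pass reads costs[x][y] for every x < len(supply), y < len(demand)
-- (with either list empty those loops run no body and A returns without touching costs).
def Pre_north_west_corner_method (supply : List Int) (demand : List Int) (costs : List (List Int)) : Prop :=
  supply = [] ∨ demand = [] ∨
    (supply.length ≤ costs.length ∧ ∀ r ∈ costs.take supply.length, demand.length ≤ r.length)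
instance (supply : List Int) (demand : List Int) (costs : List (List Int)) : Decidable (Pre_north_west_corner_method supply demand costs) := by unfold Pre_north_west_corner_method; infer_instance

def pvWitness_north_west_corner_method : List Int × List Int × List (List Int) :=
  ([3, 4], [2, 5], [[1, 2], [3, 4]])

def Spec_north_west_corner_method (supply : List Int) (demand : List Int) (costs : List (List Int)) (out : List (List Int) × Int) : Prop := out = north_west_corner_method_alt supply demand costs
instance (supply : List Int) (demand : List Int) (costs : List (List Int)) (out : List (List Int) × Int) : Decidable (Spec_north_west_corner_method supply demand costs out) := by unfold Spec_north_west_corner_method; infer_instance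

-- ===== CLAIM (what is proved, stated in full; the proofs are below) =====
def Claim_equal_north_west_corner_method : Prop := ∀ (supply : List Int) (demand : List Int) (costs : List (List Int)), Dom_north_west_corner_method supply demand costs → Pre_north_west_corner_method supply demand costs → Spec_north_west_corner_method supply demand costs (north_west_corner_method supply demand costs)

-- ===== LEMMAS AND PROOFS =====

-- proof-only: the pure core of the drain loop (demand list, current column, remaining supply)
def drain (dem : List Int) (j : Nat) (s : Int) : List Int × Nat × Int :=
  if h : j < dem.length ∧ dem.getD j 0 < s then
    drain (dem.set j 0) (j+1) (s - dem.getD j 0)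
  else (dem, j, s)
termination_by dem.length - j
decreasing_by simp only [List.length_set]; omega

lemma getD_set_ne (l : List Int) (i j : Nat) (v : Int) (h : i ≠ j) :
    (l.set i v).getD j 0 = l.getD j 0 := by
  simp [List.getD_eq_getElem?_getD, List.getElem?_set_ne h]

lemma getD_set_self (l : List Int) (i : Nat) (v : Int) (h : i < l.length) :
    (l.set i v).getD i 0 = v := by
  simp [List.getD_eq_getElem?_getD, List.getElem?_set_self h]

lemma rows_getD_set_ne (l : List (List Int)) (i j : Nat) (v : List Int) (h : i ≠ j) :
    (l.set i v).getD j [] = l.getD j [] := by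
  simp [List.getD_eq_getElem?_getD, List.getElem?_set_ne h]

lemma rows_getD_set_self (l : List (List Int)) (i : Nat) (v : List Int) (h : i < l.length) :
    (l.set i v).getD i [] = v := by
  simp [List.getD_eq_getElem?_getD, List.getElem?_set_self h]

lemma drain_props : ∀ (fuel : Nat) (dem : List Int) (j : Nat) (s : Int),
    dem.length - j ≤ fuel → j ≤ dem.length →
    j ≤ (drain dem j s).2.1 ∧ (drain dem j s).2.1 ≤ dem.length ∧
      (drain dem j s).1.length = dem.length := by
  intro fuel
  induction fuel with
  | zero =>
    intro dem j s hf hj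
    rw [drain, dif_neg (by omega)]
    exact ⟨le_rfl, hj, rfl⟩
  | succ fuel ih =>
    intro dem j s hf hj
    by_cases h : j < dem.length ∧ dem.getD j 0 < s
    · rw [drain, dif_pos h]
      have := ih (dem.set j 0) (j+1) (s - dem.getD j 0)
        (by simp only [List.length_set]; omega) (by simp only [List.length_set]; omega)
      simp only [List.length_set] at this
      exact ⟨by omega, this.2.1, this.2.2⟩
    · rw [drain, dif_neg h]
      exact ⟨le_rfl, hj, rfl⟩

lemma bDrain_eq : ∀ (fuel : Nat) (dem ci : List Int) (j : Nat) (s : Int)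
    (segs : List Int) (total : Int), dem.length - j ≤ fuel → j ≤ dem.length →
    bDrain dem ci j s segs total =
      ((drain dem j s).1, (drain dem j s).2.1, (drain dem j s).2.2,
       segs ++ (List.range' j ((drain dem j s).2.1 - j)).map (fun c => dem.getD c 0),
       total + ((List.range' j ((drain dem j s).2.1 - j)).map
         (fun c => dem.getD c 0 * ci.getD c 0)).sum) := by
  intro fuel
  induction fuel with
  | zero =>
    intro dem ci j s segs total hf hj
    rw [bDrain, dif_neg (by omega), drain, dif_neg (by omega)]
    simp
  | succ fuel ih =>
    intro dem ci j s segs total hf hj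
    by_cases h : j < dem.length ∧ dem.getD j 0 < s
    · rw [bDrain, dif_pos h]
      conv_rhs => rw [drain, dif_pos h]
      have hlen : (dem.set j 0).length = dem.length := by simp
      have hprops := drain_props (dem.length - (j+1)) (dem.set j 0) (j+1) (s - dem.getD j 0)
        (by simp only [List.length_set]; omega) (by simp only [List.length_set]; omega)
      set j' := (drain (dem.set j 0) (j+1) (s - dem.getD j 0)).2.1 with hj'def
      have hj1 : j + 1 ≤ j' := hprops.1
      rw [ih (dem.set j 0) ci (j+1) (s - dem.getD j 0) _ _
        (by simp only [List.length_set]; omega) (by simp only [List.length_set]; omega)]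
      have hrange : List.range' j (j' - j) = j :: List.range' (j+1) (j' - (j+1)) := by
        have : j' - j = (j' - (j+1)) + 1 := by omega
        rw [this, List.range'_succ]
      have hmapcongr : ∀ (f : Int → Int → Int),
          (List.range' (j+1) (j' - (j+1))).map (fun c => f ((dem.set j 0).getD c 0) (ci.getD c 0))
            = (List.range' (j+1) (j' - (j+1))).map (fun c => f (dem.getD c 0) (ci.getD c 0)) := by
        intro f
        apply List.map_congr_left
        intro c hc
        rw [List.mem_range'] at hc
        obtain ⟨t, ht, rfl⟩ := hc
        rw [getD_set_ne _ _ _ _ (by omega)]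
      rw [← hj'def]
      simp only [Prod.mk.injEq]
      refine ⟨trivial, trivial, trivial, ?_, ?_⟩
      · rw [hrange]
        simp only [List.map_cons]
        rw [hmapcongr (fun a _ => a)]
        simp
      · rw [hrange]
        simp only [List.map_cons, List.sum_cons]
        rw [hmapcongr (fun a b => a * b)]
        ring
    · rw [bDrain, dif_neg h]
      conv_rhs => rw [drain, dif_neg h]
      simp

-- proof-only: writing a consecutive segment of values into a row
def setSeg (row : List Int) (j : Nat) (vals : List Int) : List Int :=
  match vals with
  | [] => row
  | v :: vs => setSeg (row.set j v) (j+1) vs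

lemma set_append_length : ∀ (l : List Int) (a : Int) (r : List Int) (v : Int),
    (l ++ a :: r).set l.length v = l ++ v :: r := by
  intro l
  induction l with
  | nil => intro a r v; rfl
  | cons x xs ih => intro a r v; simp [ih]

lemma setSeg_sandwich : ∀ (vals pre : List Int) (t : Nat), vals.length ≤ t →
    setSeg (pre ++ List.replicate t (0:Int)) pre.length vals
      = pre ++ vals ++ List.replicate (t - vals.length) 0 := by
  intro vals
  induction vals with
  | nil => intro pre t ht; simp [setSeg]
  | cons v vs ih =>
    intro pre t ht
    simp only [List.length_cons] at ht
    obtain ⟨t', rfl⟩ : ∃ t', t = t' + 1 := ⟨t - 1, by omega⟩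
    rw [setSeg]
    have hrep : List.replicate (t' + 1) (0:Int) = 0 :: List.replicate t' 0 := rfl
    rw [hrep, set_append_length]
    have : pre ++ v :: List.replicate t' 0 = (pre ++ [v]) ++ List.replicate t' 0 := by simp
    rw [this]
    have hlen : pre.length + 1 = (pre ++ [v]).length := by simp
    rw [hlen, ih (pre ++ [v]) t' (by omega)]
    simp [Nat.succ_sub_succ]

lemma getD_replicate_zero (b k : Nat) : (List.replicate b (0:Int)).getD k 0 = 0 := by
  rw [List.getD_eq_getElem?_getD, List.getElem?_replicate]
  split <;> rfl

-- the row sum of a zero-padded segment row, as a sum over the segment's columns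
lemma rowCost_sandwich (a : Nat) (vals : List Int) (ci : List Int) (n : Nat)
    (h : a + vals.length ≤ n) :
    ((List.range n).map (fun y =>
        (List.replicate a (0:Int) ++ vals ++ List.replicate (n - a - vals.length) 0).getD y 0
          * ci.getD y 0)).sum
      = ((List.range' a vals.length).map (fun c => vals.getD (c - a) 0 * ci.getD c 0)).sum := by
  have h1 : List.range' 0 a ++ List.range' (0 + 1 * a) vals.length = List.range' 0 (a + vals.length) :=
    List.range'_append
  have h2 : List.range' 0 (a + vals.length) ++ List.range' (0 + 1 * (a + vals.length)) (n - a - vals.length)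
      = List.range' 0 ((a + vals.length) + (n - a - vals.length)) := List.range'_append
  simp only [Nat.zero_add, Nat.one_mul] at h1 h2
  have hsplit : List.range' 0 a ++ List.range' a vals.length ++ List.range' (a + vals.length) (n - a - vals.length)
      = List.range n := by
    calc List.range' 0 a ++ List.range' a vals.length ++ List.range' (a + vals.length) (n - a - vals.length)
        = List.range' 0 (a + vals.length) ++ List.range' (a + vals.length) (n - a - vals.length) := by rw [h1]
      _ = List.range' 0 ((a + vals.length) + (n - a - vals.length)) := h2
      _ = List.range n := by rw [List.range_eq_range']; congr 1; omega
  rw [← hsplit]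
  simp only [List.map_append, List.sum_append]
  have hpre : ((List.range' 0 a).map (fun y =>
      (List.replicate a (0:Int) ++ vals ++ List.replicate (n - a - vals.length) 0).getD y 0
        * ci.getD y 0)).sum = 0 := by
    apply List.sum_eq_zero
    intro x hx
    simp only [List.mem_map] at hx
    obtain ⟨y, hy, rfl⟩ := hx
    rw [List.mem_range'] at hy
    obtain ⟨t, ht, rfl⟩ := hy
    simp only [Nat.zero_add, Nat.one_mul]
    rw [List.getD_eq_getElem?_getD, List.append_assoc,
      List.getElem?_append_left (by simp; omega)]
    rw [List.getElem?_replicate, if_pos (by omega)]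
    simp
  have hsuf : ((List.range' (a + vals.length) (n - a - vals.length)).map (fun y =>
      (List.replicate a (0:Int) ++ vals ++ List.replicate (n - a - vals.length) 0).getD y 0
        * ci.getD y 0)).sum = 0 := by
    apply List.sum_eq_zero
    intro x hx
    simp only [List.mem_map] at hx
    obtain ⟨y, hy, rfl⟩ := hx
    rw [List.mem_range'] at hy
    obtain ⟨t, ht, rfl⟩ := hy
    rw [List.getD_eq_getElem?_getD, List.append_assoc,
      List.getElem?_append_right (by simp; omega),
      List.getElem?_append_right (by simp; omega)]
    rw [List.getElem?_replicate]
    split <;> simp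
  have hmid : ∀ y ∈ List.range' a vals.length,
      (List.replicate a (0:Int) ++ vals ++ List.replicate (n - a - vals.length) 0).getD y 0
        = vals.getD (y - a) 0 := by
    intro y hy
    rw [List.mem_range'] at hy
    obtain ⟨t, ht, rfl⟩ := hy
    simp only [Nat.one_mul]
    rw [List.getD_eq_getElem?_getD, List.append_assoc,
      List.getElem?_append_right (by simp only [List.length_replicate]; omega)]
    rw [List.getElem?_append_left (by simp only [List.length_replicate]; omega)]
    rw [List.getD_eq_getElem?_getD]
    simp
  rw [hpre, hsuf, List.map_congr_left (fun y hy => by rw [hmid y hy])]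
  ring

-- getD of the collected window of demand values
lemma window_getD (dem : List Int) (j len t : Nat) (ht : t < len) (extra : List Int) :
    (((List.range' j len).map (fun c => dem.getD c 0)) ++ extra).getD t 0 = dem.getD (j + t) 0 := by
  rw [List.getD_eq_getElem?_getD, List.getElem?_append_left (by simp [ht]),
    List.getElem?_map, List.getElem?_range' ht]
  simp

lemma sum_window (dem ci : List Int) (j len : Nat) (extra : List Int) :
    ((List.range' j len).map (fun c =>
        ((((List.range' j len).map (fun c => dem.getD c 0)) ++ extra).getD (c - j) 0)
          * ci.getD c 0)).sum
      = ((List.range' j len).map (fun c => dem.getD c 0 * ci.getD c 0)).sum := by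
  apply congrArg
  apply List.map_congr_left
  intro c hc
  rw [List.mem_range'] at hc
  obtain ⟨t, ht, rfl⟩ := hc
  simp only [Nat.one_mul]
  rw [show j + t - j = t by omega, window_getD dem j len t ht extra]

-- A's loop through one full row, in terms of `drain`
lemma nwAllocA_row : ∀ (fuel : Nat) (dem : List Int) (j : Nat), dem.length - j ≤ fuel →
    ∀ (sup : List Int) (i : Nat) (M : List (List Int)) (dem1 : List Int) (j' : Nat) (s' : Int),
    i < sup.length → j < dem.length → M.length = sup.length →
    drain dem j (sup.getD i 0) = (dem1, j', s') →
    nwAllocA M sup dem i j =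
      if j' < dem.length then
        nwAllocA (M.set i (setSeg (M.getD i []) j
            ((List.range' j (j' - j)).map (fun c => dem.getD c 0) ++ [s'])))
          (sup.set i 0) (dem1.set j' (dem1.getD j' 0 - s')) (i+1) j'
      else
        M.set i (setSeg (M.getD i []) j ((List.range' j (j' - j)).map (fun c => dem.getD c 0))) := by
  intro fuel
  induction fuel with
  | zero => intro dem j hf sup i M dem1 j' s' hi hj hM hdr; omega
  | succ fuel ih =>
    intro dem j hf sup i M dem1 j' s' hi hj hM hdr
    rw [nwAllocA, dif_pos ⟨hi, hj⟩]
    simp only []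
    by_cases hds : dem.getD j 0 < sup.getD i 0
    · -- drain step: advance j
      rw [drain, dif_pos ⟨hj, hds⟩] at hdr
      have hmin : min (sup.getD i 0) (dem.getD j 0) = dem.getD j 0 :=
        min_eq_right (le_of_lt hds)
      rw [hmin]
      have hsup : (sup.set i (sup.getD i 0 - dem.getD j 0)).getD i 0
          = sup.getD i 0 - dem.getD j 0 := getD_set_self _ _ _ hi
      rw [if_neg (by rw [hsup]; omega)]
      have hdem0 : dem.set j (dem.getD j 0 - dem.getD j 0) = dem.set j 0 := by
        congr 1; omega
      rw [hdem0]
      have hprops := drain_props (dem.length - (j+1)) (dem.set j 0) (j+1)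
        (sup.getD i 0 - dem.getD j 0)
        (by simp only [List.length_set]; omega) (by simp only [List.length_set]; omega)
      rw [hdr] at hprops
      simp only [List.length_set] at hprops
      have hj1 : j + 1 ≤ j' := hprops.1
      by_cases hjn : j + 1 < dem.length
      · have hsup2 : (sup.set i (sup.getD i 0 - dem.getD j 0)).getD i 0
            = sup.getD i 0 - dem.getD j 0 := getD_set_self _ _ _ hi
        have hdr' : drain (dem.set j 0) (j+1)
            ((sup.set i (sup.getD i 0 - dem.getD j 0)).getD i 0) = (dem1, j', s') := by
          rw [hsup2]; exact hdr
        rw [ih (dem.set j 0) (j+1) (by simp only [List.length_set]; omega)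
          (sup.set i (sup.getD i 0 - dem.getD j 0)) i
          (M.set i ((M.getD i []).set j (dem.getD j 0))) dem1 j' s'
          (by simp only [List.length_set]; exact hi)
          (by simp only [List.length_set]; exact hjn)
          (by simp only [List.length_set]; exact hM)
          hdr']
        have hMrow : (M.set i ((M.getD i []).set j (dem.getD j 0))).getD i []
            = (M.getD i []).set j (dem.getD j 0) :=
          rows_getD_set_self _ _ _ (by omega)
        have hwindow : ∀ (L : List Int),
            setSeg ((M.getD i []).set j (dem.getD j 0)) (j+1)
              ((List.range' (j+1) (j' - (j+1))).map (fun c => (dem.set j 0).getD c 0) ++ L)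
              = setSeg (M.getD i []) j
                ((List.range' j (j' - j)).map (fun c => dem.getD c 0) ++ L) := by
          intro L
          have hcongr : (List.range' (j+1) (j' - (j+1))).map (fun c => (dem.set j 0).getD c 0)
              = (List.range' (j+1) (j' - (j+1))).map (fun c => dem.getD c 0) := by
            apply List.map_congr_left
            intro c hc
            rw [List.mem_range'] at hc
            obtain ⟨t, ht, rfl⟩ := hc
            exact getD_set_ne _ _ _ _ (by omega)
          have hrange : List.range' j (j' - j) = j :: List.range' (j+1) (j' - (j+1)) := by
            rw [show j' - j = (j' - (j+1)) + 1 by omega, List.range'_succ]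
          rw [hcongr, hrange]
          simp only [List.map_cons, List.cons_append]
          rfl
        have hwindow0 : setSeg ((M.getD i []).set j (dem.getD j 0)) (j+1)
            (List.map (fun c => (dem.set j 0).getD c 0) (List.range' (j+1) (j' - (j+1))))
            = setSeg (M.getD i []) j
              (List.map (fun c => dem.getD c 0) (List.range' j (j' - j))) := by
          have h0 := hwindow []
          simpa using h0
        simp only [List.length_set, hMrow, List.set_set, hwindow, hwindow0]
      · -- the row ran off the last column: both sides stop
        have hjeq : j + 1 = dem.length := by omega
        rw [drain, dif_neg (by simp only [List.length_set]; omega)] at hdr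
        simp only [Prod.mk.injEq] at hdr
        obtain ⟨hdem1, hj'2, hs'⟩ := hdr
        rw [nwAllocA, dif_neg (by simp only [List.length_set]; omega)]
        rw [if_neg (by omega)]
        have hrange : List.range' j (j' - j) = [j] := by
          rw [show j' - j = 1 by omega]
          rfl
        rw [hrange]
        simp [setSeg]
    · -- closing cell: advance i
      rw [drain, dif_neg (by intro hcon; exact hds hcon.2)] at hdr
      obtain ⟨h1, h2, h3⟩ : dem = dem1 ∧ j = j' ∧ sup.getD i 0 = s' := by
        have := hdr
        simp only [Prod.mk.injEq] at this
        exact ⟨this.1, this.2.1, this.2.2⟩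
      subst h1; subst h2; subst h3
      have hmin : min (sup.getD i 0) (dem.getD j 0) = sup.getD i 0 := min_eq_left (by omega)
      rw [hmin]
      have hsup0 : sup.set i (sup.getD i 0 - sup.getD i 0) = sup.set i 0 := by congr 1; omega
      rw [hsup0, if_pos (getD_set_self _ _ _ hi), if_pos hj]
      simp [setSeg]
  

-- untouched earlier rows of the matrix are preserved by A's loop
lemma nwAllocA_frame : ∀ (fuel : Nat) (sup dem : List Int) (i j : Nat) (M : List (List Int)),
    (sup.length - i) + (dem.length - j) ≤ fuel →
    ∀ x, x < i → (nwAllocA M sup dem i j).getD x [] = M.getD x [] := by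
  intro fuel
  induction fuel with
  | zero =>
    intro sup dem i j M hf x hx
    rw [nwAllocA, dif_neg (by omega)]
  | succ fuel ih =>
    intro sup dem i j M hf x hx
    by_cases h : i < sup.length ∧ j < dem.length
    · rw [nwAllocA, dif_pos h]
      simp only []
      split
      · rw [ih _ _ (i+1) j _ (by simp only [List.length_set]; omega) x (by omega)]
        exact rows_getD_set_ne _ _ _ _ (by omega)
      · rw [ih _ _ i (j+1) _ (by simp only [List.length_set]; omega) x (by omega)]
        exact rows_getD_set_ne _ _ _ _ (by omega)
    · rw [nwAllocA, dif_neg h]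

lemma repl_rowsum (n : Nat) (ci : List Int) :
    ((List.range n).map (fun y => (List.replicate n (0:Int)).getD y 0 * ci.getD y 0)).sum = 0 := by
  apply List.sum_eq_zero
  intro t ht
  simp only [List.mem_map] at ht
  obtain ⟨y, _, rfl⟩ := ht
  rw [getD_replicate_zero]
  ring

lemma rows_zero_sum (costs : List (List Int)) (n : Nat) (M : List (List Int)) (a b : Nat)
    (h : ∀ x, a ≤ x → x < a + b → M.getD x [] = List.replicate n (0:Int)) :
    ((List.range' a b).map (fun x => ((List.range n).map (fun y =>
      (M.getD x []).getD y 0 * ((costs.getD x []).getD y 0))).sum)).sum = 0 := by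
  apply List.sum_eq_zero
  intro t ht
  simp only [List.mem_map] at ht
  obtain ⟨x, hx, rfl⟩ := ht
  rw [List.mem_range'] at hx
  obtain ⟨u, hu, rfl⟩ := hx
  rw [h (a + 1 * u) (by omega) (by omega)]
  exact repl_rowsum n _

lemma take_succ_getD (M : List (List Int)) (i : Nat) (h : i < M.length) :
    M.take (i+1) = M.take i ++ [M.getD i []] := by
  rw [List.take_add_one, List.getElem?_eq_getElem h]
  simp [List.getD_eq_getElem?_getD, List.getElem?_eq_getElem h]

lemma take_set (M : List (List Int)) (i : Nat) (r : List Int) :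
    (M.set i r).take i = M.take i := by
  apply List.ext_getElem
  · simp only [List.length_take, List.length_set]
  · intro x h1 h2
    simp only [List.length_take, List.length_set] at h1
    simp only [List.getElem_take]
    exact List.getElem_set_ne (by omega) _

-- the whole program: B's fold from row i computes A's matrix from (i, j), and
-- accumulates exactly the cost of the rows it appends
lemma main_fold : ∀ (k : Nat) (costs : List (List Int)) (n : Nat) (sup dem : List Int)
    (j : Nat) (M : List (List Int)) (total : Int) (i : Nat),
    i + k = sup.length → dem.length = n → j ≤ n → M.length = sup.length →
    (∀ x, i ≤ x → x < sup.length → M.getD x [] = List.replicate n (0:Int)) →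
    ((List.range' i k).foldl (bStep costs n) (sup, dem, j, M.take i, total)).2.2.2.1
        = nwAllocA M sup dem i j ∧
    ((List.range' i k).foldl (bStep costs n) (sup, dem, j, M.take i, total)).2.2.2.2
        = total + ((List.range' i k).map (fun x =>
            ((List.range n).map (fun y =>
              ((nwAllocA M sup dem i j).getD x []).getD y 0
                * ((costs.getD x []).getD y 0))).sum)).sum := by
  intro k
  induction k with
  | zero =>
    intro costs n sup dem j M total i hik hn hj hM hinv
    have hi : i = sup.length := by omega
    rw [nwAllocA, dif_neg (by omega)]
    rw [show M.take i = M by rw [hi, ← hM, List.take_length]]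
    simp
  | succ k ih =>
    intro costs n sup dem j M total i hik hn hj hM hinv
    have hi : i < sup.length := by omega
    have hiM : i < M.length := by omega
    rw [List.range'_succ]
    simp only [List.foldl_cons]
    by_cases hjn : n ≤ j
    · -- j = n: the remaining rows are all zero
      have hstep : bStep costs n (sup, dem, j, M.take i, total) i
          = (sup, dem, j, M.take i ++ [List.replicate n 0], total) := by
        simp only [bStep]
        rw [if_pos hjn]
      rw [hstep]
      have hrow : M.getD i [] = List.replicate n 0 := hinv i le_rfl hi
      rw [show M.take i ++ [List.replicate n (0:Int)] = M.take (i+1) by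
        rw [take_succ_getD M i hiM, hrow]]
      have hA : nwAllocA M sup dem i j = M := by
        rw [nwAllocA, dif_neg (by omega)]
      have hA1 : nwAllocA M sup dem (i+1) j = M := by
        rw [nwAllocA, dif_neg (by omega)]
      have IH := ih costs n sup dem j M total (i+1) (by omega) hn hj hM
        (fun x hx1 hx2 => hinv x (by omega) hx2)
      rw [hA1] at IH
      refine ⟨by rw [IH.1, hA], ?_⟩
      rw [IH.2, hA, List.map_cons, List.sum_cons]
      rw [rows_zero_sum costs n M (i+1) k (fun x h1 h2 => hinv x (by omega) (by omega))]
      rw [hinv i le_rfl hi, repl_rowsum]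
      ring
    · -- j < n: one real row
      have hjd : j < dem.length := by omega
      rcases hdr : drain dem j (sup.getD i 0) with ⟨dem1, j', s'⟩
      have hprops := drain_props (dem.length - j) dem j (sup.getD i 0) le_rfl (by omega)
      rw [hdr] at hprops
      dsimp only at hprops
      obtain ⟨hjj', hj'le, hdem1len⟩ := hprops
      have hbd := bDrain_eq (dem.length - j) dem (costs.getD i []) j (sup.getD i 0) [] total
        le_rfl (by omega)
      rw [hdr] at hbd
      dsimp only at hbd
      simp only [List.nil_append] at hbd
      have hROW := nwAllocA_row (dem.length - j) dem j le_rfl sup i M dem1 j' s' hi hjd hM hdr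
      have hrow0 : M.getD i [] = List.replicate n 0 := hinv i le_rfl hi
      have hWlen : ((List.range' j (j' - j)).map (fun c => dem.getD c 0)).length = j' - j := by
        simp
      by_cases hj' : j' < n
      · -- the row closes at column j'
        rw [if_pos (show j' < dem.length by omega)] at hROW
        have hstep : bStep costs n (sup, dem, j, M.take i, total) i
            = (sup.set i 0, dem1.set j' (dem1.getD j' 0 - s'), j',
               M.take i ++ [List.replicate j 0 ++
                 ((List.range' j (j' - j)).map (fun c => dem.getD c 0) ++ [s']) ++
                 List.replicate (n - j - (((List.range' j (j' - j)).map (fun c => dem.getD c 0) ++ [s'])).length) 0],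
               (total + ((List.range' j (j' - j)).map
                   (fun c => dem.getD c 0 * (costs.getD i []).getD c 0)).sum)
                 + s' * (costs.getD i []).getD j' 0) := by
          simp only [bStep]
          rw [if_neg (by omega), hbd]
          dsimp only
          rw [if_pos hj']
        rw [hstep]
        have hsand : List.replicate j (0:Int) ++
              ((List.range' j (j' - j)).map (fun c => dem.getD c 0) ++ [s']) ++
              List.replicate (n - j - (((List.range' j (j' - j)).map (fun c => dem.getD c 0) ++ [s'])).length) 0
            = setSeg (M.getD i [])  j
                ((List.range' j (j' - j)).map (fun c => dem.getD c 0) ++ [s']) := by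
          rw [hrow0]
          rw [show (List.replicate n (0:Int)) = List.replicate j 0 ++ List.replicate (n - j) 0 by
            rw [← List.replicate_add]; congr 1; omega]
          have hs := setSeg_sandwich ((List.range' j (j' - j)).map (fun c => dem.getD c 0) ++ [s'])
            (List.replicate j (0:Int)) (n - j) (by simp; omega)
          simp only [List.length_replicate] at hs
          rw [hs]
        rw [hsand]
        have htake : M.take i ++ [setSeg (M.getD i []) j
              ((List.range' j (j' - j)).map (fun c => dem.getD c 0) ++ [s'])]
            = (M.set i (setSeg (M.getD i [])  j
                ((List.range' j (j' - j)).map (fun c => dem.getD c 0) ++ [s']))).take (i+1) := by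
          rw [take_succ_getD _ i (by simp only [List.length_set]; omega), take_set,
            rows_getD_set_self _ _ _ hiM]
        rw [htake]
        have IH := ih costs n (sup.set i 0) (dem1.set j' (dem1.getD j' 0 - s')) j'
          (M.set i (setSeg (M.getD i []) j
            ((List.range' j (j' - j)).map (fun c => dem.getD c 0) ++ [s'])))
          ((total + ((List.range' j (j' - j)).map
              (fun c => dem.getD c 0 * (costs.getD i []).getD c 0)).sum)
            + s' * (costs.getD i []).getD j' 0)
          (i+1)
          (by simp only [List.length_set]; omega)
          (by simp only [List.length_set]; omega)
          (by omega)
          (by simp only [List.length_set]; omega)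
          (by intro x hx1 hx2
              simp only [List.length_set] at hx2
              rw [rows_getD_set_ne _ _ _ _ (by omega)]
              exact hinv x (by omega) hx2)
        rw [hROW]
        refine ⟨IH.1, ?_⟩
        rw [IH.2]
        -- split the cost sum at row i and compute row i's cost
        rw [List.map_cons, List.sum_cons]
        have hframe := nwAllocA_frame
          (((sup.set i 0).length - (i+1)) + (((dem1.set j' (dem1.getD j' 0 - s')).length) - j'))
          (sup.set i 0) (dem1.set j' (dem1.getD j' 0 - s')) (i+1) j'
          (M.set i (setSeg (M.getD i []) j
            ((List.range' j (j' - j)).map (fun c => dem.getD c 0) ++ [s'])))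
          le_rfl i (by omega)
        rw [hframe, rows_getD_set_self _ _ _ hiM, ← hsand]
        have hcost : ((List.range n).map (fun y =>
            (List.replicate j (0:Int) ++
              ((List.range' j (j' - j)).map (fun c => dem.getD c 0) ++ [s']) ++
              List.replicate (n - j - (((List.range' j (j' - j)).map (fun c => dem.getD c 0) ++ [s'])).length) 0).getD y 0
              * ((costs.getD i []).getD y 0))).sum
            = ((List.range' j (j' - j)).map
                (fun c => dem.getD c 0 * (costs.getD i []).getD c 0)).sum
              + s' * ((costs.getD i []).getD j' 0) := by
          have hrc := rowCost_sandwich j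
            ((List.range' j (j' - j)).map (fun c => dem.getD c 0) ++ [s'])
            (costs.getD i []) n (by simp; omega)
          rw [hrc]
          have hsplit2 : List.range' j ((j' - j) + 1)
              = List.range' j (j' - j) ++ [j + (j' - j)] := by
            have h2 := @List.range'_append j (j' - j) 1 1
            rw [List.range'_one] at h2
            simp only [Nat.one_mul] at h2
            rw [← h2]
          rw [show (((List.range' j (j' - j)).map (fun c => dem.getD c 0) ++ [s'])).length
              = (j' - j) + 1 by simp]
          rw [hsplit2, List.map_append, List.sum_append]
          rw [sum_window dem (costs.getD i []) j (j' - j) [s']]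
          have hlast : ((List.range' j (j' - j)).map (fun c => dem.getD c 0) ++ [s']).getD
              (j + (j' - j) - j) 0 = s' := by
            rw [show j + (j' - j) - j = j' - j by omega, List.getD_eq_getElem?_getD,
              List.getElem?_append_right (by simp)]
            simp
          simp only [List.map_cons, List.map_nil, List.sum_cons, List.sum_nil]
          rw [hlast, show j + (j' - j) = j' by omega]
          ring
        rw [hcost]
        ring
      · -- the row ran to the last column: j' = n, the rest of B appends zero rows
        have hj'n : j' = n := by omega
        rw [if_neg (by omega)] at hROW
        have hstep : bStep costs n (sup, dem, j, M.take i, total) i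
            = (sup.set i s', dem1, j',
               M.take i ++ [List.replicate j 0 ++
                 ((List.range' j (j' - j)).map (fun c => dem.getD c 0)) ++
                 List.replicate (n - j - (((List.range' j (j' - j)).map (fun c => dem.getD c 0))).length) 0],
               total + ((List.range' j (j' - j)).map
                 (fun c => dem.getD c 0 * (costs.getD i []).getD c 0)).sum) := by
          simp only [bStep]
          rw [if_neg (by omega), hbd]
          dsimp only
          rw [if_neg (by omega)]
        rw [hstep]
        have hsand : List.replicate j (0:Int) ++
              ((List.range' j (j' - j)).map (fun c => dem.getD c 0)) ++
              List.replicate (n - j - (((List.range' j (j' - j)).map (fun c => dem.getD c 0))).length) 0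
            = setSeg (M.getD i []) j ((List.range' j (j' - j)).map (fun c => dem.getD c 0)) := by
          rw [hrow0]
          rw [show (List.replicate n (0:Int)) = List.replicate j 0 ++ List.replicate (n - j) 0 by
            rw [← List.replicate_add]; congr 1; omega]
          have hs := setSeg_sandwich ((List.range' j (j' - j)).map (fun c => dem.getD c 0))
            (List.replicate j (0:Int)) (n - j) (by simp; omega)
          simp only [List.length_replicate] at hs
          rw [hs]
        rw [hsand]
        have htake : M.take i ++ [setSeg (M.getD i []) j
              ((List.range' j (j' - j)).map (fun c => dem.getD c 0))]
            = (M.set i (setSeg (M.getD i []) j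
                ((List.range' j (j' - j)).map (fun c => dem.getD c 0)))).take (i+1) := by
          rw [take_succ_getD _ i (by simp only [List.length_set]; omega), take_set,
            rows_getD_set_self _ _ _ hiM]
        rw [htake]
        have hinv1 : ∀ x, i+1 ≤ x → x < sup.length →
            (M.set i (setSeg (M.getD i []) j
              ((List.range' j (j' - j)).map (fun c => dem.getD c 0)))).getD x []
              = List.replicate n 0 := by
          intro x hx1 hx2
          rw [rows_getD_set_ne _ _ _ _ (by omega)]
          exact hinv x (by omega) hx2
        have IH := ih costs n (sup.set i s') dem1 j'
          (M.set i (setSeg (M.getD i []) j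
            ((List.range' j (j' - j)).map (fun c => dem.getD c 0))))
          (total + ((List.range' j (j' - j)).map
            (fun c => dem.getD c 0 * (costs.getD i []).getD c 0)).sum)
          (i+1)
          (by simp only [List.length_set]; omega)
          (by omega)
          (by omega)
          (by simp only [List.length_set]; omega)
          (by intro x hx1 hx2
              simp only [List.length_set] at hx2
              exact hinv1 x hx1 hx2)
        have hA1 : nwAllocA (M.set i (setSeg (M.getD i []) j
              ((List.range' j (j' - j)).map (fun c => dem.getD c 0))))
            (sup.set i s') dem1 (i+1) j'
            = M.set i (setSeg (M.getD i []) j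
                ((List.range' j (j' - j)).map (fun c => dem.getD c 0))) := by
          rw [nwAllocA, dif_neg (by omega)]
        rw [hA1] at IH
        rw [hROW]
        refine ⟨IH.1, ?_⟩
        rw [IH.2]
        rw [List.map_cons, List.sum_cons]
        have hz1 : ((List.range' (i+1) k).map (fun x => ((List.range n).map (fun y =>
            ((M.set i (setSeg (M.getD i []) j
              ((List.range' j (j' - j)).map (fun c => dem.getD c 0)))).getD x []).getD y 0
              * ((costs.getD x []).getD y 0))).sum)).sum = 0 :=
          rows_zero_sum costs n _ (i+1) k (fun x h1 h2 => hinv1 x h1 (by omega))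
        rw [hz1]
        rw [rows_getD_set_self _ _ _ hiM, ← hsand]
        have hcost : ((List.range n).map (fun y =>
            (List.replicate j (0:Int) ++
              ((List.range' j (j' - j)).map (fun c => dem.getD c 0)) ++
              List.replicate (n - j - (((List.range' j (j' - j)).map (fun c => dem.getD c 0))).length) 0).getD y 0
              * ((costs.getD i []).getD y 0))).sum
            = ((List.range' j (j' - j)).map
                (fun c => dem.getD c 0 * (costs.getD i []).getD c 0)).sum := by
          have hrc := rowCost_sandwich j
            ((List.range' j (j' - j)).map (fun c => dem.getD c 0))
            (costs.getD i []) n (by simp; omega)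
          rw [hrc]
          rw [show (((List.range' j (j' - j)).map (fun c => dem.getD c 0))).length
              = j' - j by simp]
          have hsw := sum_window dem (costs.getD i []) j (j' - j) []
          simp only [List.append_nil] at hsw
          rw [hsw]
        rw [hcost]
        ring

-- the two ports agree on every input
theorem nw_equal (supply demand : List Int) (costs : List (List Int)) :
    north_west_corner_method supply demand costs = north_west_corner_method_alt supply demand costs := by
  unfold north_west_corner_method north_west_corner_method_alt
  simp only []
  have hMz : ∀ x, 0 ≤ x → x < supply.length →
      (((List.range supply.length).map (fun _ => (List.range demand.length).map (fun _ => (0 : Int))))).getD x []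
        = List.replicate demand.length 0 := by
    intro x _ hx
    rw [List.getD_eq_getElem?_getD, List.getElem?_map, List.getElem?_range (by simpa using hx)]
    simp
  have hlen : (((List.range supply.length).map (fun _ => (List.range demand.length).map (fun _ => (0 : Int))))).length
      = supply.length := by simp
  have hmain := main_fold supply.length costs demand.length supply demand 0
    ((List.range supply.length).map (fun _ => (List.range demand.length).map (fun _ => (0 : Int))))
    0 0 (by omega) rfl (by omega) hlen (fun x h1 h2 => hMz x h1 h2)
  simp only [List.take_zero] at hmain
  rw [← List.range_eq_range'] at hmain
  rw [Prod.mk.injEq]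
  refine ⟨hmain.1.symm, ?_⟩
  rw [hmain.2]
  simp only [PySem.List.foldl_add, zero_add]

-- ===== VERDICT (by name: the statement is the Claim_ definition above) =====
theorem north_west_corner_method_spec : Claim_equal_north_west_corner_method := by
  intro supply demand costs _ _
  unfold Spec_north_west_corner_method
  exact nw_equal supply demand costs
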